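-- pv_equiv track=rewrite | github.com/madpabz/image-titler | image_titler/trc_image_titler.py | split_string_by_nearest_middle_space
-- ===== SOURCE A (Python) =====
-- def split_string_by_nearest_middle_space(input_string: str) -> tuple:
--     """
--     Splits a string by the nearest middle space.
--
--     :param input_string: some string
--     :return: a pair of strings
--     """
--     index = len(input_string) // 2
--     curr_char = input_string[index]
--     n = 1
--     while not curr_char.isspace():
--         index += (-1) ** (n + 1) * n  # thanks wolfram alpha (1, -2, 3, -4, ...)
--         curr_char = input_string[index]
--         n += 1
--     return input_string[:index], input_string[index + 1:]
-- ===== SOURCE B (Python) =====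
-- def split_string_by_nearest_middle_space(input_string: str) -> tuple:
--     """Split at the space nearest the middle: collect all whitespace indices
--     once, then pick the one minimizing (distance to middle, right-before-left)."""
--     mid = len(input_string) // 2
--     spaces = [i for i, c in enumerate(input_string) if c.isspace()]
--     idx = min(spaces, key=lambda i: (abs(i - mid), mid - i))
--     return input_string[:idx], input_string[idx + 1:]
-- ===== Notes on version B (the rewrite author's own statement) =====
-- stated objective: alternative
-- what changed: Replaces A's stateful alternating-offset probe loop ((-1)^(n+1)*n updates from the middle outward) by a declarative pass: collect all whitespace indices once and take min with key (distance to middle, right-before-left tiebreak); where A raises IndexError, B raises too (no-space input) or returns (even-length input whose only space is at index 0), all outside Pre_.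
-- outside the precondition, e.g. on split_string_by_nearest_middle_space(' abc'): A raises IndexError, B returns ('', 'abc')
import Mathlib
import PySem

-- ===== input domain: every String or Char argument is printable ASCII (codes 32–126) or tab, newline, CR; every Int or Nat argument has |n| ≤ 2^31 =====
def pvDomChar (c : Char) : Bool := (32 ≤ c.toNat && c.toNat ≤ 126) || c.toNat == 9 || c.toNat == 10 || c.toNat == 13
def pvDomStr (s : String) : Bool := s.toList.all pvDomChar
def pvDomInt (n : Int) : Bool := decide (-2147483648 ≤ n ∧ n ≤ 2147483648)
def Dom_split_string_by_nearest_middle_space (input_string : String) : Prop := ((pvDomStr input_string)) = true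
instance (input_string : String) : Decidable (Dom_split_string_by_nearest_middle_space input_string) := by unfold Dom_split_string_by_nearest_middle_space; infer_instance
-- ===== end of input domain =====

-- B replaces A's alternating-offset probe loop with "collect whitespace indices, take min by
-- (distance to middle, right side first)" — a different decomposition of the same O(n) task.

-- ===== PORT A =====
-- the while loop; n is the Python counter, fuel only makes the recursion structural
-- (2*len+2 steps always suffice: the probe walk hits an out-of-range index, i.e. pyGet? = none, before that)
def pvLoopA (l : List Char) (index : Int) (n : Nat) (c : Char) (fuel : Nat) : Option Int :=
  match fuel with
  | 0 => none
  | fuel + 1 =>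
    if PySem.Chars.isspace c then some index
    else
      let index' := index + (-1 : Int) ^ (n + 1) * (n : Int)
      match PySem.List.pyGet? l index' with
      | none => none                                  -- IndexError (excluded by Pre_)
      | some c' => pvLoopA l index' (n + 1) c' fuel

def split_string_by_nearest_middle_space (input_string : String) : String × String :=
  let l := input_string.toList
  let index := PySem.Int.floordiv (l.length : Int) 2
  match PySem.List.pyGet? l index with
  | none => ("", "")                                  -- IndexError (excluded by Pre_)
  | some c =>
    match pvLoopA l index 1 c (2 * l.length + 2) with
    | none => ("", "")                                -- IndexError (excluded by Pre_)
    | some idx =>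
      (PySem.Str.slice input_string none (some idx),
       PySem.Str.slice input_string (some (idx + 1)) none)

-- ===== PORT B =====
def split_string_by_nearest_middle_space_alt (input_string : String) : String × String :=
  let mid := PySem.Int.floordiv (PySem.Str.len input_string) 2
  let spaces := ((PySem.List.enumerate input_string.toList 0).filter
      (fun p => PySem.Chars.isspace p.2)).map (fun p => p.1)
  match PySem.List.min2? spaces (fun i => |i - mid|) (fun i => mid - i) with
  | none => ("", "")                                  -- ValueError from min([]) (excluded by Pre_)
  | some idx =>
      (PySem.Str.slice input_string none (some idx),
       PySem.Str.slice input_string (some (idx + 1)) none)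

-- ===== PRECONDITION & SPEC =====
-- Pre_ excludes exactly the inputs where A raises IndexError: the empty string and strings with no
-- whitespace at any probed index (A probes every index when the length is odd, every index except 0
-- when the length is even, then runs off the right end; e.g. on ' abc' A raises while B returns ('', 'abc')).
def Pre_split_string_by_nearest_middle_space (input_string : String) : Prop :=
  ((if input_string.toList.length % 2 = 0 then input_string.toList.drop 1 else input_string.toList).any
    PySem.Chars.isspace) = true
instance (input_string : String) : Decidable (Pre_split_string_by_nearest_middle_space input_string) := by
  unfold Pre_split_string_by_nearest_middle_space; infer_instance

def pvWitness_split_string_by_nearest_middle_space : String := "a b"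

def Spec_split_string_by_nearest_middle_space (input_string : String) (out : String × String) : Prop :=
  out = split_string_by_nearest_middle_space_alt input_string
instance (input_string : String) (out : String × String) : Decidable (Spec_split_string_by_nearest_middle_space input_string out) := by
  unfold Spec_split_string_by_nearest_middle_space; infer_instance

-- ===== CLAIM (what is proved, stated in full; the proofs are below) =====
def Claim_equal_split_string_by_nearest_middle_space : Prop :=
  ∀ (input_string : String), Dom_split_string_by_nearest_middle_space input_string →
    Pre_split_string_by_nearest_middle_space input_string →
    Spec_split_string_by_nearest_middle_space input_string (split_string_by_nearest_middle_space input_string)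

-- ===== LEMMAS AND PROOFS =====

-- "the character at Python index i of l is whitespace"
def pvSp (l : List Char) (i : Int) : Bool :=
  match PySem.List.pyGet? l i with
  | some c => PySem.Chars.isspace c
  | none => false

lemma pvSp_nat (l : List Char) (t : Nat) (ht : t < l.length) :
    pvSp l (t : Int) = PySem.Chars.isspace l[t] := by
  unfold pvSp
  rw [PySem.List.pyGet?_natCast, List.getElem?_eq_getElem ht]

def pvP (m : Int) (j : Nat) : Int :=
  if j % 2 = 1 then m + (((j + 1) / 2 : Nat) : Int) else m - ((j / 2 : Nat) : Int)

lemma pvNegOnePow (j : Nat) : (-1 : Int) ^ (j + 2) = if j % 2 = 0 then 1 else -1 := by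
  rcases Nat.even_or_odd j with h | h
  · rw [if_pos (Nat.even_iff.mp h)]
    exact Even.neg_one_pow (by rcases h with ⟨c, hc⟩; exact ⟨c + 1, by omega⟩)
  · have h1 := Nat.odd_iff.mp h
    rw [if_neg (by omega)]
    exact Odd.neg_one_pow (by rcases h with ⟨c, hc⟩; exact ⟨c + 1, by omega⟩)

lemma pvP_step (m : Int) (j : Nat) :
    pvP m (j + 1) = pvP m j + (-1 : Int) ^ (j + 2) * ((j + 1 : Nat) : Int) := by
  rw [pvNegOnePow]
  by_cases h : j % 2 = 1
  · simp only [pvP, h, (by omega : (j+1) % 2 ≠ 1), (by omega : ¬ (j % 2 = 0)), if_neg, if_pos, if_false]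
    push_cast; omega
  · simp only [pvP, (by omega : (j+1) % 2 = 1), h, (by omega : j % 2 = 0), if_pos, if_neg, if_true]
    push_cast; omega

lemma pvP_key1 (m : Int) (j : Nat) : |pvP m j - m| = (((j + 1) / 2 : Nat) : Int) := by
  by_cases h : j % 2 = 1 <;>
    simp only [pvP, h, if_pos, if_neg, if_true, if_false] <;>
    rw [abs_eq (by positivity)] <;> push_cast <;> omega

lemma pvP_lex (m : Int) (k k' : Nat) (h : k < k') :
    |pvP m k - m| < |pvP m k' - m| ∨
    (|pvP m k - m| = |pvP m k' - m| ∧ m - pvP m k < m - pvP m k') := by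
  rw [pvP_key1, pvP_key1]
  by_cases hq : (k + 1) / 2 < (k' + 1) / 2
  · left; exact_mod_cast hq
  · right
    have hk : k % 2 = 1 ∧ k' = k + 1 := by omega
    constructor
    · exact_mod_cast (by omega : (k + 1) / 2 = (k' + 1) / 2)
    · simp only [pvP, hk.1, hk.2, (by omega : (k+1) % 2 ≠ 1), if_pos, if_neg]
      push_cast; omega

lemma pvP_range (len : Nat) (hl : 1 ≤ len) (j : Nat) (hj : j ≤ 2 * (len - 1 - len / 2)) :
    0 ≤ pvP ((len / 2 : Nat) : Int) j ∧ pvP ((len / 2 : Nat) : Int) j < (len : Int) := by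
  by_cases h : j % 2 = 1 <;> simp only [pvP, h, if_pos, if_neg, if_true, if_false] <;>
    push_cast <;> omega

lemma pvP_surj (len : Nat) (i : Nat) (hi : i < len) (hlo : 1 ≤ i ∨ len % 2 = 1) :
    ∃ k, k ≤ 2 * (len - 1 - len / 2) ∧ pvP ((len / 2 : Nat) : Int) k = (i : Int) := by
  by_cases h : len / 2 < i
  · exact ⟨2 * (i - len / 2) - 1, by omega, by
      simp only [pvP, (by omega : (2 * (i - len / 2) - 1) % 2 = 1), if_pos]
      push_cast; omega⟩
  · exact ⟨2 * (len / 2 - i), by omega, by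
      simp only [pvP, (by omega : ¬ (2 * (len / 2 - i)) % 2 = 1), if_neg]
      push_cast; omega⟩

lemma pvLoopA_spec (l : List Char) (hl : 1 ≤ l.length) :
    ∀ (d j : Nat) (c : Char) (fuel : Nat),
      j + d = 2 * (l.length - 1 - l.length / 2) + 1 →
      d ≤ fuel →
      PySem.List.pyGet? l (pvP ((l.length / 2 : Nat) : Int) j) = some c →
      (∃ k, j ≤ k ∧ k ≤ 2 * (l.length - 1 - l.length / 2) ∧ pvSp l (pvP ((l.length / 2 : Nat) : Int) k) = true) →
      ∃ k, j ≤ k ∧ k ≤ 2 * (l.length - 1 - l.length / 2) ∧ pvSp l (pvP ((l.length / 2 : Nat) : Int) k) = true ∧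
        (∀ i, j ≤ i → i < k → pvSp l (pvP ((l.length / 2 : Nat) : Int) i) = false) ∧
        pvLoopA l (pvP ((l.length / 2 : Nat) : Int) j) (j + 1) c fuel = some (pvP ((l.length / 2 : Nat) : Int) k) := by
  intro d
  induction d with
  | zero =>
    intro j c fuel hd _ _ hex
    rcases hex with ⟨k, hk1, hk2, _⟩
    omega
  | succ d ih =>
    intro j c fuel hd hfuel hget hex
    obtain ⟨f, rfl⟩ : ∃ f, fuel = f + 1 := ⟨fuel - 1, by omega⟩
    by_cases hsp : PySem.Chars.isspace c
    · refine ⟨j, le_refl j, by omega, ?_, by omega, ?_⟩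
      · unfold pvSp; rw [hget]; simpa using hsp
      · simp [pvLoopA, hsp]
    · -- current char is not a space, loop advances to probe j+1
      have hjlt : j + 1 ≤ 2 * (l.length - 1 - l.length / 2) := by
        rcases hex with ⟨k, hk1, hk2, hk3⟩
        rcases Nat.eq_or_lt_of_le hk1 with rfl | h
        · exfalso; rw [pvSp, hget] at hk3; simp [hsp] at hk3
        · omega
      have hrange := pvP_range l.length hl (j + 1) hjlt
      have hget' : ∃ c', PySem.List.pyGet? l (pvP ((l.length / 2 : Nat) : Int) (j + 1)) = some c' := by
        rw [PySem.List.pyGet?_of_nonneg _ hrange.1]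
        have : (pvP ((l.length / 2 : Nat) : Int) (j + 1)).toNat < l.length := by omega
        exact ⟨_, List.getElem?_eq_getElem this⟩
      obtain ⟨c', hget'⟩ := hget'
      have hex' : ∃ k, j + 1 ≤ k ∧ k ≤ 2 * (l.length - 1 - l.length / 2) ∧
          pvSp l (pvP ((l.length / 2 : Nat) : Int) k) = true := by
        rcases hex with ⟨k, hk1, hk2, hk3⟩
        refine ⟨k, ?_, hk2, hk3⟩
        rcases Nat.eq_or_lt_of_le hk1 with rfl | h
        · exfalso; rw [pvSp, hget] at hk3; simp [hsp] at hk3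
        · omega
      obtain ⟨k, hk1, hk2, hk3, hk4, hk5⟩ := ih (j + 1) c' f (by omega) (by omega) hget' hex'
      refine ⟨k, by omega, hk2, hk3, ?_, ?_⟩
      · intro i hi1 hi2
        rcases Nat.eq_or_lt_of_le hi1 with rfl | h
        · rw [pvSp, hget]; simp [hsp]
        · exact hk4 i h hi2
      · show pvLoopA l _ (j + 1) c (f + 1) = _
        rw [pvLoopA]
        rw [if_neg (by simp [hsp])]
        simp only
        rw [← pvP_step, hget']
        exact hk5

lemma pvMin2_aux {α : Type} (k1 k2 : α → Int) (m : α) :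
    ∀ (xs : List α) (acc : Option α),
      (∀ y ∈ xs, y = m ∨ k1 m < k1 y ∨ (k1 m = k1 y ∧ k2 m < k2 y)) →
      ((m ∈ xs ∧ (acc = none ∨ ∃ a, acc = some a ∧ (a = m ∨ k1 m < k1 a ∨ (k1 m = k1 a ∧ k2 m < k2 a)))) ∨ acc = some m) →
      List.foldl
        (fun acc x =>
          match acc with
          | none => some x
          | some mm =>
            if (decide (k1 x < k1 mm) || !decide (k1 mm < k1 x) && decide (k2 x < k2 mm)) = true then some x else some mm)
        acc xs = some m := by
  intro xs
  induction xs with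
  | nil =>
    intro acc _ hacc
    rcases hacc with ⟨hm, _⟩ | h
    · exact absurd hm (List.not_mem_nil)
    · simpa using h
  | cons x t ih =>
    intro acc hall hacc
    simp only [List.foldl_cons]
    refine ih _ (fun y hy => hall y (List.mem_cons_of_mem x hy)) ?_
    have hx := hall x (List.mem_cons_self)
    rcases hacc with ⟨hm, hacc⟩ | rfl
    · rcases hacc with rfl | ⟨a, rfl, ha⟩
      · -- acc = none, new acc = some x
        rcases hx with rfl | hlt
        · right; rfl
        · left
          refine ⟨?_, Or.inr ⟨x, rfl, Or.inr hlt⟩⟩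
          rcases List.mem_cons.mp hm with heq | hmt
          · subst heq; rcases hlt with h | ⟨h, h2⟩ <;> omega
          · exact hmt
      · -- acc = some a
        rcases hx with rfl | hxlt
        · -- x = m : the step must pick m (or a = m already)
          rcases ha with rfl | halt
          · -- a = m too
            right
            simp only
            split_ifs with h
            · rfl
            · rfl
          · right
            simp only
            rw [if_pos]
            simp only [Bool.or_eq_true, decide_eq_true_eq, Bool.and_eq_true, Bool.not_eq_true',
              decide_eq_false_iff_not]
            rcases halt with h | ⟨h1, h2⟩
            · exact Or.inl h
            · exact Or.inr ⟨by omega, by omega⟩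
        · -- x ≠ m (strictly worse than m); whatever wins, invariant holds
          have hmt : m ∈ t := by
            rcases List.mem_cons.mp hm with heq | hmt
            · subst heq; rcases hxlt with h | ⟨h, h2⟩ <;> omega
            · exact hmt
          left
          refine ⟨hmt, Or.inr ?_⟩
          simp only
          split_ifs with h
          · exact ⟨x, rfl, Or.inr hxlt⟩
          · exact ⟨a, rfl, ha⟩
    · -- acc = some m
      right
      simp only
      rw [if_neg]
      simp only [Bool.or_eq_true, decide_eq_true_eq, Bool.and_eq_true, Bool.not_eq_true',
        decide_eq_false_iff_not]
      rcases hx with rfl | hlt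
      · omega
      · rcases hlt with h | ⟨h1, h2⟩
        · omega
        · omega

lemma pvMin2_eq_of_unique {α : Type} (xs : List α) (k1 k2 : α → Int) (m : α)
    (hm : m ∈ xs)
    (hmin : ∀ y ∈ xs, y = m ∨ k1 m < k1 y ∨ (k1 m = k1 y ∧ k2 m < k2 y)) :
    PySem.List.min2? xs k1 k2 = some m := by
  unfold PySem.List.min2?
  exact pvMin2_aux k1 k2 m xs none hmin (Or.inl ⟨hm, Or.inl rfl⟩)

-- evaluation of port A under Pre_
lemma pvA_eval (s : String) (k : Nat) (c0 : Char)
    (hget0 : PySem.List.pyGet? s.toList (pvP ((s.toList.length / 2 : Nat) : Int) 0) = some c0)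
    (hloop : pvLoopA s.toList (pvP ((s.toList.length / 2 : Nat) : Int) 0) 1 c0 (2 * s.toList.length + 2) =
      some (pvP ((s.toList.length / 2 : Nat) : Int) k)) :
    split_string_by_nearest_middle_space s =
      (PySem.Str.slice s none (some (pvP ((s.toList.length / 2 : Nat) : Int) k)),
       PySem.Str.slice s (some (pvP ((s.toList.length / 2 : Nat) : Int) k + 1)) none) := by
  have hfl : PySem.Int.floordiv ((s.toList.length : Int)) 2 = pvP ((s.toList.length / 2 : Nat) : Int) 0 := by
    rw [PySem.Int.floordiv_eq_ediv_of_pos (by norm_num)]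
    simp only [pvP]
    norm_num
  unfold split_string_by_nearest_middle_space
  simp only [hfl, hget0, hloop]

lemma pvB_spaces_mem (l : List Char) (y : Int) :
    (y ∈ ((PySem.List.enumerate l 0).filter (fun p => PySem.Chars.isspace p.2)).map (fun p => p.1)) ↔
      ∃ u : Nat, u < l.length ∧ y = (u : Int) ∧ pvSp l (u : Int) = true := by
  simp only [List.mem_map, List.mem_filter, PySem.List.mem_enumerate_iff]
  constructor
  · rintro ⟨⟨yi, c⟩, ⟨⟨u, hu, heq⟩, hspc⟩, rfl⟩
    rw [Prod.mk.injEq] at heq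
    refine ⟨u, hu, by simpa using heq.1, ?_⟩
    rw [pvSp_nat l u hu, ← heq.2]
    exact hspc
  · rintro ⟨u, hu, rfl, hsp⟩
    rw [pvSp_nat l u hu] at hsp
    exact ⟨((u : Int), l[u]), ⟨⟨u, hu, by simp⟩, hsp⟩, rfl⟩

-- ===== VERDICT (by name: the statement is the Claim_ definition above) =====
theorem split_string_by_nearest_middle_space_spec : Claim_equal_split_string_by_nearest_middle_space := by
  intro s _ hPre
  unfold Spec_split_string_by_nearest_middle_space
  unfold Pre_split_string_by_nearest_middle_space at hPre
  -- a whitespace character at a probed index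
  have hPre' : ∃ t : Nat, t < s.toList.length ∧ (1 ≤ t ∨ s.toList.length % 2 = 1) ∧
      pvSp s.toList (t : Int) = true := by
    by_cases hpar : s.toList.length % 2 = 0
    · rw [if_pos hpar] at hPre
      obtain ⟨c, hc, hcsp⟩ := List.any_eq_true.mp hPre
      obtain ⟨u, hu, hcu⟩ := List.mem_iff_getElem.mp hc
      have hu' : 1 + u < s.toList.length := by
        simpa using (by omega : u < s.toList.length - 1 → 1 + u < s.toList.length) (by simpa using hu)
      refine ⟨1 + u, hu', by omega, ?_⟩
      rw [pvSp_nat _ _ hu']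
      rw [List.getElem_drop] at hcu
      rw [hcu]
      exact hcsp
    · rw [if_neg hpar] at hPre
      obtain ⟨c, hc, hcsp⟩ := List.any_eq_true.mp hPre
      obtain ⟨u, hu, hcu⟩ := List.mem_iff_getElem.mp hc
      refine ⟨u, hu, by omega, ?_⟩
      rw [pvSp_nat _ _ hu, hcu]
      exact hcsp
  obtain ⟨t, ht, hto, htsp⟩ := hPre'
  have hlen1 : 1 ≤ s.toList.length := by omega
  -- run A's loop
  have hr0 := pvP_range s.toList.length hlen1 0 (Nat.zero_le _)
  have hget0 : ∃ c0, PySem.List.pyGet? s.toList (pvP ((s.toList.length / 2 : Nat) : Int) 0) = some c0 := by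
    rw [PySem.List.pyGet?_of_nonneg _ hr0.1]
    exact ⟨_, List.getElem?_eq_getElem (by omega)⟩
  obtain ⟨c0, hget0⟩ := hget0
  obtain ⟨kt, hkt, hpkt⟩ := pvP_surj s.toList.length t ht hto
  obtain ⟨k, -, hk2, hk3, hk4, hloop⟩ :=
    pvLoopA_spec s.toList hlen1 (2 * (s.toList.length - 1 - s.toList.length / 2) + 1) 0 c0
      (2 * s.toList.length + 2) (by omega) (by omega) hget0
      ⟨kt, Nat.zero_le _, hkt, by rw [hpkt]; exact htsp⟩
  rw [pvA_eval s k c0 hget0 hloop]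
  -- evaluate B to the same split index
  have hrk := pvP_range s.toList.length hlen1 k hk2
  have hmin2 : PySem.List.min2?
      (((PySem.List.enumerate s.toList 0).filter (fun p => PySem.Chars.isspace p.2)).map (fun p => p.1))
      (fun i => |i - ((s.toList.length / 2 : Nat) : Int)|)
      (fun i => ((s.toList.length / 2 : Nat) : Int) - i) =
      some (pvP ((s.toList.length / 2 : Nat) : Int) k) := by
    apply pvMin2_eq_of_unique
    · rw [pvB_spaces_mem]
      refine ⟨(pvP ((s.toList.length / 2 : Nat) : Int) k).toNat, by omega,
        (Int.toNat_of_nonneg hrk.1).symm, ?_⟩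
      rw [Int.toNat_of_nonneg hrk.1]
      exact hk3
    · intro y hy
      rw [pvB_spaces_mem] at hy
      obtain ⟨u, hu, rfl, husp⟩ := hy
      by_cases hul : 1 ≤ u ∨ s.toList.length % 2 = 1
      · obtain ⟨ky, hky, hpky⟩ := pvP_surj s.toList.length u hu hul
        rcases Nat.lt_trichotomy ky k with hlt | rfl | hgt
        · exfalso
          have := hk4 ky (Nat.zero_le _) hlt
          rw [hpky] at this
          simp [this] at husp
        · left; rw [hpky]
        · right
          have hlex := pvP_lex ((s.toList.length / 2 : Nat) : Int) k ky hgt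
          rw [hpky] at hlex
          exact hlex
      · -- even length, u = 0: index 0 is strictly farther from the middle than any probed index
        rw [not_or] at hul
        have hu0 : u = 0 := by omega
        have hpar : s.toList.length % 2 = 0 := by omega
        right; left
        subst hu0
        rw [pvP_key1]
        have h0 : |((0 : Nat) : Int) - ((s.toList.length / 2 : Nat) : Int)| =
            ((s.toList.length / 2 : Nat) : Int) := by
          rw [Nat.cast_zero, zero_sub, abs_neg, abs_of_nonneg (by positivity)]
        rw [h0]
        push_cast
        omega
  unfold split_string_by_nearest_middle_space_alt
  simp only [PySem.Str.len_eq]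
  have hfl : PySem.Int.floordiv ((s.toList.length : Int)) 2 = ((s.toList.length / 2 : Nat) : Int) := by
    rw [PySem.Int.floordiv_eq_ediv_of_pos (by norm_num)]
    omega
  simp only [hfl, hmin2]
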